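-- pv_equiv track=rewrite | github.com/pypi-data/pypi-mirror-338 | packages/embedd-all/embedd_all-0.0.940.tar.gz/embedd_all-0.0.940/finding_anagrams.py | solve
-- ===== SOURCE A (Python) =====
-- from typing import List, Dict
-- from collections import Counter, defaultdict
--
-- def canonical(word: str) -> str:
--     return ''.join(sorted(word.replace(' ', '').lower()))
--
-- def find_anagrams(dictionary_words: List[str], phrase_counter, current_anagram, start):
--     if all(count == 0 for count in phrase_counter.values()):
--         return [current_anagram[:]]
--
--     anagrams = []
--     for word in dictionary_words:
--         word_count = Counter(word.lower())
--         if all(phrase_counter[ch] >= word_count[ch] for ch in word_count):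
--                 # Choose the word, add to the current set
--             current_anagram.append(word)
--                 # Decrease the counts
--             phrase_counter.subtract(word_count)
--                 # Explore further
--             anagrams.extend(find_anagrams(dictionary_words, phrase_counter, current_anagram, start + 1))
--                 # Backtrack
--             phrase_counter.update(word_count)
--             current_anagram.pop()
--
--     return anagrams
--
-- def solve(input: str) -> Dict[str, List[List[str]]]:
--     sections = input.split('#')
--     # Extract dictionary terms and phrases
--     dictionary_words = sections[0].strip().split()
--     phrases = sections[1].strip().split('\n')
--
--
--
--     # Create a map of words by their canonical form
--     word_dict = defaultdict(list)
--     for word in dictionary_words: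
--         canonical_form = canonical(word)
--         word_dict[canonical_form].append(word)
--
--     result = {}
--     for phrase in phrases:
--         phrase = phrase.strip()
--         if not phrase:
--             continue
--         phrase_counter = Counter(canonical(phrase).lower())
--         anagrams = find_anagrams(dictionary_words, phrase_counter, [], 0)
--
--         if anagrams:
--             result[phrase] = anagrams
--
--     return result
-- ===== SOURCE B (Python) =====
-- from collections import Counter
--
--
-- def canonical(word):
--     return ''.join(sorted(word.replace(' ', '').lower()))
--
--
-- def solve(input):
--     sections = input.split('#')
--     dictionary_words = sections[0].strip().split()
--     phrases = sections[1].strip().split('\n')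
--
--     # Precompute each word's letter counter once.
--     word_counters = [(w, Counter(w.lower())) for w in dictionary_words]
--
--     result = {}
--     for phrase in phrases:
--         phrase = phrase.strip()
--         if not phrase:
--             continue
--         phrase_counter = Counter(canonical(phrase).lower())
--
--         # Explicit-stack iterative DFS (pre-order, left-to-right).
--         found = []
--         stack = [(phrase_counter, [])]
--         while stack:
--             remaining, seq = stack.pop()
--             if all(v == 0 for v in remaining.values()):
--                 found.append(seq)
--                 continue
--             fitting = [(w, wc) for (w, wc) in word_counters
--                        if all(remaining[c] >= wc[c] for c in wc)]
--             # push in reverse so the first fitting word is explored first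
--             for w, wc in reversed(fitting):
--                 nr = remaining.copy()
--                 nr.subtract(wc)
--                 stack.append((nr, seq + [w]))
--         if found:
--             result[phrase] = found
--     return result
-- ===== Notes on version B (the rewrite author's own statement) =====
-- stated objective: alternative
-- what changed: The recursive backtracking enumeration (mutating one shared Counter and anagram list with subtract/update and append/pop) is replaced by an explicit-stack iterative DFS whose frames carry fresh decremented Counters and sequences, with each dictionary word's Counter precomputed once; children are pushed in reverse so the recursion's left-to-right pre-order output is reproduced.
import Mathlib
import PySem

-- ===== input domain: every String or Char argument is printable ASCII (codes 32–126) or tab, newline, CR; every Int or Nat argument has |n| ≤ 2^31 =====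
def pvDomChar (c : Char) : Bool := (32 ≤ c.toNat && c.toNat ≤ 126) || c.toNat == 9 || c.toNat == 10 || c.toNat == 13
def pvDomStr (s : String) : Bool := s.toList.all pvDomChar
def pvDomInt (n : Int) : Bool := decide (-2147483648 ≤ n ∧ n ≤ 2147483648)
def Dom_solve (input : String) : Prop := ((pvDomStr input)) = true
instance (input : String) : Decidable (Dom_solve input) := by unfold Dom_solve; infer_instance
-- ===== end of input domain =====

-- B re-implements the recursive backtracking enumeration as an explicit-stack iterative DFS with
-- per-word counters precomputed once (objective: alternative decomposition; parsing kept identical).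
-- Both ports carry a fuel guard only to make the same computation total; with the initial fuel used
-- it is never exhausted on inputs the Python terminates on.

-- ===== PORT A =====
-- shared helpers: Python's canonical(), Counter(word.lower()), the >=-fit test, Counter.subtract
def pyCanonical (w : List Char) : List Char :=
  PySem.List.sorted (PySem.Chars.lower (PySem.Chars.replace w [' '] [])) (fun c => c) false

def wordCounter (w : String) : PySem.Dict Char Int :=
  PySem.Dict.counter (PySem.Chars.lower w.toList)

def counterFits (pc wc : PySem.Dict Char Int) : Bool :=
  wc.items.all (fun p => decide (p.2 ≤ pc.getD p.1 0))

def counterSub (pc wc : PySem.Dict Char Int) : PySem.Dict Char Int :=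
  wc.items.foldl (fun d p => d.modify p.1 0 (fun v => v - p.2)) pc

-- fuel: one more than the total remaining count; each recursion level removes a nonempty word
def fuelOf (pc : PySem.Dict Char Int) : Nat :=
  ((PySem.Dict.values pc).map Int.toNat).sum + 1

mutual
-- find_anagrams; backtracking (subtract/append, then update/pop) becomes passing fresh values down
def findAnagrams (fuel : Nat) (words : List String) (pc : PySem.Dict Char Int)
    (cur : List String) : List (List String) :=
  match fuel with
  | 0 => []
  | f + 1 =>
    if (PySem.Dict.values pc).all (fun c => c == 0) then [cur]
    else findLoop f words words pc cur []
termination_by (fuel, words.length + 1)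

-- the 'for word in dictionary_words' loop with its 'anagrams' accumulator
def findLoop (f : Nat) (words pending : List String) (pc : PySem.Dict Char Int)
    (cur : List String) (acc : List (List String)) : List (List String) :=
  match pending with
  | [] => acc
  | w :: rest =>
    let wc := wordCounter w
    if counterFits pc wc then
      findLoop f words rest pc cur (acc ++ findAnagrams f words (counterSub pc wc) (cur ++ [w]))
    else
      findLoop f words rest pc cur acc
termination_by (f + 1, pending.length)
end

def solve (input : String) : List (String × List (List String)) :=
  let sections := (PySem.Str.split? input "#").getD []   -- sep "#" ≠ "": split? is always some
  match PySem.List.pyGet? sections 0 with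
  | none => []   -- unreachable: split always returns a first section
  | some s0 =>
    match PySem.List.pyGet? sections 1 with
    | none => []   -- sections[1]: IndexError, excluded by Pre_solve
    | some s1 =>
      let dictionaryWords := PySem.Str.split₀ (PySem.Str.strip s0)
      let phrases := (PySem.Str.split? (PySem.Str.strip s1) "\n").getD []
      -- word_dict is built by the Python but never read afterwards
      let _wordDict := dictionaryWords.foldl
        (fun d w => d.modify (pyCanonical w.toList) [] (fun l => l ++ [w]))
        (PySem.Dict.empty (κ := List Char) (ν := List String))
      (phrases.foldl (fun res phrase =>
        let p := PySem.Str.strip phrase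
        if p = "" then res
        else
          let pc := PySem.Dict.counter (PySem.Chars.lower (pyCanonical p.toList))
          let anagrams := findAnagrams (fuelOf pc) dictionaryWords pc []
          if anagrams = [] then res else res.insert p anagrams)
        (PySem.Dict.empty (κ := String) (ν := List (List String)))).items

-- ===== PORT B =====
-- weight of a stack of frames, used only as the termination measure of dfsLoop
def stackWeight (b : Nat) : List (Nat × PySem.Dict Char Int × List String) → Nat
  | [] => 0
  | fr :: rest => b ^ fr.1 + stackWeight b rest

lemma stackWeight_append (b : Nat) (l r : List (Nat × PySem.Dict Char Int × List String)) :
    stackWeight b (l ++ r) = stackWeight b l + stackWeight b r := by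
  induction l with
  | nil => simp [stackWeight]
  | cons fr t ih => simp [stackWeight, ih]; ring

lemma stackWeight_map {α : Type} (b f : Nat) (g : α → PySem.Dict Char Int × List String)
    (l : List α) : stackWeight b (l.map (fun x => (f, g x))) = l.length * b ^ f := by
  induction l with
  | nil => simp [stackWeight]
  | cons x t ih => simp [stackWeight, ih]; ring

lemma stackWeight_push_lt {α : Type} (b f : Nat) (g : α → PySem.Dict Char Int × List String)
    (l : List α) (hb : l.length < b)
    (rest : List (Nat × PySem.Dict Char Int × List String)) (rem : PySem.Dict Char Int)
    (seq : List String) :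
    stackWeight b (l.map (fun x => (f, g x)) ++ rest) <
      stackWeight b ((f + 1, rem, seq) :: rest) := by
  rw [stackWeight_append, stackWeight_map]
  have hpow : 0 < b ^ f := Nat.pow_pos (by omega)
  have h1 : l.length * b ^ f < b * b ^ f := by nlinarith
  have h2 : stackWeight b ((f + 1, rem, seq) :: rest) = b * b ^ f + stackWeight b rest := by
    simp [stackWeight, pow_succ]; ring
  omega

-- the while-stack loop of B; Lean's list head is Python's stack top, so pushing the fitting
-- children in reversed order is prepending them in order
def dfsLoop (wcs : List (String × PySem.Dict Char Int))
    (stack : List (Nat × PySem.Dict Char Int × List String))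
    (out : List (List String)) : List (List String) :=
  match stack with
  | [] => out
  | (fuel, rem, seq) :: rest =>
    match fuel with
    | 0 => dfsLoop wcs rest out
    | f + 1 =>
      if (PySem.Dict.values rem).all (fun c => c == 0) then
        dfsLoop wcs rest (out ++ [seq])
      else
        dfsLoop wcs
          ((wcs.filter (fun p => counterFits rem p.2)).map
            (fun p => (f, counterSub rem p.2, seq ++ [p.1])) ++ rest) out
termination_by stackWeight (wcs.length + 2) stack
decreasing_by
  · simp [stackWeight]
  · simp only [stackWeight, Nat.succ_eq_add_one]
    have : 0 < (wcs.length + 2) ^ (f + 1) := Nat.pow_pos (by omega)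
    omega
  · have hb : (wcs.attach.filter (fun x => counterFits rem x.1.2)).length <
        wcs.length + 2 := by
      have h1 := List.length_filter_le (fun x => counterFits rem x.1.2) wcs.attach
      have h2 : wcs.attach.length = wcs.length := by simp
      omega
    exact stackWeight_push_lt _ _ _ _ hb _ _ _

def solve_alt (input : String) : List (String × List (List String)) :=
  let sections := (PySem.Str.split? input "#").getD []
  match PySem.List.pyGet? sections 0 with
  | none => []
  | some s0 =>
    match PySem.List.pyGet? sections 1 with
    | none => []
    | some s1 =>
      let dictionaryWords := PySem.Str.split₀ (PySem.Str.strip s0)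
      let phrases := (PySem.Str.split? (PySem.Str.strip s1) "\n").getD []
      let wordCounters := dictionaryWords.map (fun w => (w, wordCounter w))
      (phrases.foldl (fun res phrase =>
        let p := PySem.Str.strip phrase
        if p = "" then res
        else
          let pc := PySem.Dict.counter (PySem.Chars.lower (pyCanonical p.toList))
          let found := dfsLoop wordCounters [(fuelOf pc, pc, [])] []
          if found = [] then res else res.insert p found)
        (PySem.Dict.empty (κ := String) (ν := List (List String)))).items

-- ===== PRECONDITION & SPEC =====
-- Pre_ excludes inputs with no '#', on which the Python A raises IndexError at sections[1]
def Pre_solve (input : String) : Prop := PySem.Str.isIn "#" input = true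
instance (input : String) : Decidable (Pre_solve input) := by unfold Pre_solve; infer_instance

def pvWitness_solve : String := "dog god cat act#dog cat"

def Spec_solve (input : String) (out : List (String × List (List String))) : Prop :=
  out = solve_alt input
instance (input : String) (out : List (String × List (List String))) :
    Decidable (Spec_solve input out) := by unfold Spec_solve; infer_instance

-- ===== CLAIM (what is proved, stated in full; the proofs are below) =====
def Claim_equal_solve : Prop :=
  ∀ (input : String), Dom_solve input → Pre_solve input → Spec_solve input (solve input)

-- ===== LEMMAS AND PROOFS =====

lemma dfsLoop_nil (wcs : List (String × PySem.Dict Char Int)) (out : List (List String)) :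
    dfsLoop wcs [] out = out := by
  rw [dfsLoop]

lemma findLoop_eq (f : Nat) (words : List String) (pc : PySem.Dict Char Int)
    (cur : List String) :
    ∀ (pending : List String) (acc : List (List String)),
      findLoop f words pending pc cur acc =
        acc ++ (pending.filter (fun w => counterFits pc (wordCounter w))).flatMap
          (fun w => findAnagrams f words (counterSub pc (wordCounter w)) (cur ++ [w])) := by
  intro pending
  induction pending with
  | nil => intro acc; rw [findLoop]; simp
  | cons w rest ih =>
    intro acc
    rw [findLoop]
    by_cases h : counterFits pc (wordCounter w)
    · simp only [h, if_true, ih, List.filter_cons, List.flatMap_cons, List.append_assoc]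
    · simp [h, ih]

lemma dfs_eq (words : List String) :
    ∀ (fuel : Nat) (rem : PySem.Dict Char Int) (seq : List String)
      (rest : List (Nat × PySem.Dict Char Int × List String)) (out : List (List String)),
      dfsLoop (words.map (fun w => (w, wordCounter w))) ((fuel, rem, seq) :: rest) out =
        dfsLoop (words.map (fun w => (w, wordCounter w))) rest
          (out ++ findAnagrams fuel words rem seq) := by
  intro fuel
  induction fuel with
  | zero =>
    intro rem seq rest out
    rw [dfsLoop, findAnagrams]
    simp
  | succ f ih =>
    intro rem seq rest out
    rw [dfsLoop, findAnagrams]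
    by_cases h : (PySem.Dict.values rem).all (fun c => c == 0)
    · simp [h]
    · simp only [h, Bool.false_eq_true, if_false]
      -- the pushed children over the mapped-and-filtered dictionary
      have hfm : (words.map (fun w => (w, wordCounter w))).filter
            (fun p => counterFits rem p.2) =
          (words.filter (fun w => counterFits rem (wordCounter w))).map
            (fun w => (w, wordCounter w)) := by
        rw [List.filter_map]
        rfl
      rw [hfm, List.map_map, findLoop_eq]
      -- children lemma: a block of same-fuel frames expands to the concatenation of subtrees
      have child : ∀ (ws : List String)
          (rest : List (Nat × PySem.Dict Char Int × List String)) (out : List (List String)),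
          dfsLoop (words.map (fun w => (w, wordCounter w)))
              (ws.map (fun w => (f, counterSub rem (wordCounter w), seq ++ [w])) ++ rest) out =
            dfsLoop (words.map (fun w => (w, wordCounter w))) rest
              (out ++ ws.flatMap
                (fun w => findAnagrams f words (counterSub rem (wordCounter w)) (seq ++ [w]))) := by
        intro ws
        induction ws with
        | nil => intro rest out; simp
        | cons w t iht =>
          intro rest out
          simp only [List.map_cons, List.cons_append, List.flatMap_cons]
          rw [ih, iht, List.append_assoc]
      have := child (words.filter (fun w => counterFits rem (wordCounter w))) rest out
      simpa [Function.comp] using this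

lemma solve_eq_alt (input : String) : solve input = solve_alt input := by
  unfold solve solve_alt
  dsimp only
  cases h0 : PySem.List.pyGet? ((PySem.Str.split? input "#").getD []) 0 with
  | none => rfl
  | some s0 =>
    cases h1 : PySem.List.pyGet? ((PySem.Str.split? input "#").getD []) 1 with
    | none => rfl
    | some s1 =>
      refine congrArg PySem.Dict.items (congrFun (congrFun (congrArg List.foldl ?_) _) _)
      funext res phrase
      by_cases hp : PySem.Str.strip phrase = ""
      · rw [if_pos hp, if_pos hp]
      · rw [if_neg hp, if_neg hp]
        have hdfs := dfs_eq (PySem.Str.split₀ (PySem.Str.strip s0))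
          (fuelOf (PySem.Dict.counter (PySem.Chars.lower (pyCanonical (PySem.Str.strip phrase).toList))))
          (PySem.Dict.counter (PySem.Chars.lower (pyCanonical (PySem.Str.strip phrase).toList)))
          [] [] []
        rw [dfsLoop_nil] at hdfs
        simp only [List.nil_append] at hdfs
        rw [hdfs]

-- ===== VERDICT (by name: the statement is the Claim_ definition above) =====
theorem solve_spec : Claim_equal_solve := by
  intro input _ _
  unfold Spec_solve
  exact solve_eq_alt input
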